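-- pv_equiv track=rewrite | github.com/farinaleo/gomoku | ft_gomoku/AI/heurisitic/freedom_alignment.py | freedom_rate
-- ===== SOURCE A (Python) =====
-- def freedom_rate(line, player, opponent, cases):
--     """Evaluate the alignment freedom.
--     :param line: the extracted line
--     :param player: the player value
--     :param opponent: the opponent value
--     :param cases: all possible alignments cases.
--     :return: 0 for flanked, 2 for free, 1 for half-free or no alignment.
--     """
--     if line.count(player) < 2:
--         return 0
--     friends = 0
--     for c in line:
--         if c == player:
--             friends = friends + 1
--             if friends >= 2:
--                 break
--         if c == opponent:
--             friends = 0
--     if friends < 2: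
--         return 0
--     for case in cases:
--         if case[0] in line:
--             return case[1]
--     return 0
-- ===== SOURCE B (Python) =====
-- def freedom_rate(line, player, opponent, cases):
--     """Evaluate the alignment freedom.
--
--     B: split the line into the maximal opponent-free segments and check each
--     segment's player count, instead of A's running counter with reset/break
--     (A's total-count guard is subsumed).
--     """
--     segments = []
--     cur = []
--     for c in line:
--         if c == opponent:
--             segments.append(cur)
--             cur = []
--         else:
--             cur.append(c)
--     segments.append(cur)
--     if not any(seg.count(player) >= 2 for seg in segments):
--         return 0
--     for case in cases:
--         if case[0] in line:
--             return case[1]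
--     return 0
-- ===== Notes on version B (the rewrite author's own statement) =====
-- stated objective: alternative
-- what changed: B first splits the line into maximal opponent-free segments and declares an alignment when some segment contains at least two player cells, replacing A's single scan with a running friends counter that resets on opponent cells and breaks early, and dropping A's redundant total-count guard.
import Mathlib
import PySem

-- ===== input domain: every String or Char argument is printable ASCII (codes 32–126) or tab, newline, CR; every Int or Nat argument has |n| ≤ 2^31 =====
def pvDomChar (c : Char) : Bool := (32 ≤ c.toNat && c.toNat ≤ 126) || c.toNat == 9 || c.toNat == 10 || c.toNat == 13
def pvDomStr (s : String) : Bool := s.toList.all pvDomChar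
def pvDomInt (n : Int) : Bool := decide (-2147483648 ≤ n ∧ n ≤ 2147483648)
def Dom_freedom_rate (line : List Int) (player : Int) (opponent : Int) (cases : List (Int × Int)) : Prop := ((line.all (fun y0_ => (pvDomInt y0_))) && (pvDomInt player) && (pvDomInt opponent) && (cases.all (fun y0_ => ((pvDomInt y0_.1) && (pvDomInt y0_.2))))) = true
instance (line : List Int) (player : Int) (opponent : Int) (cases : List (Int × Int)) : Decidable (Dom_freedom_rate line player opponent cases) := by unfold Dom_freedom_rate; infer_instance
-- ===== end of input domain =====

-- B replaces A's running counter (reset on opponent, break at 2) by splitting the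
-- line into maximal opponent-free segments and counting players per segment
-- (objective: alternative decomposition, same cost).

-- ===== PORT A =====
-- the 'for c in line' loop with its break: friends counter, reset on opponent cells
def frLoopA (player opponent : Int) : List Int → Nat → Nat
  | [], friends => friends
  | c :: rest, friends =>
    if c = player then
      if 2 ≤ friends + 1 then friends + 1
      else if c = opponent then frLoopA player opponent rest 0
      else frLoopA player opponent rest (friends + 1)
    else if c = opponent then frLoopA player opponent rest 0
    else frLoopA player opponent rest friends

-- the 'for case in cases' loop
def frCasesA (line : List Int) : List (Int × Int) → Int
  | [] => 0
  | c :: rest => if c.1 ∈ line then c.2 else frCasesA line rest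

def freedom_rate (line : List Int) (player : Int) (opponent : Int) (cases : List (Int × Int)) : Int :=
  if PySem.List.count line player < 2 then 0
  else if frLoopA player opponent line 0 < 2 then 0
  else frCasesA line cases

-- ===== PORT B =====
-- split the line into the maximal opponent-free segments (cur is the open segment)
def frSegs (opponent : Int) : List Int → List Int → List (List Int)
  | [], cur => [cur]
  | c :: rest, cur =>
    if c = opponent then cur :: frSegs opponent rest []
    else frSegs opponent rest (cur ++ [c])

def frCasesB (line : List Int) : List (Int × Int) → Int
  | [] => 0
  | c :: rest => if c.1 ∈ line then c.2 else frCasesB line rest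

def freedom_rate_alt (line : List Int) (player : Int) (opponent : Int) (cases : List (Int × Int)) : Int :=
  if ¬ (frSegs opponent line []).any (fun seg => 2 ≤ PySem.List.count seg player) then 0
  else frCasesB line cases

-- ===== PRECONDITION & SPEC =====
def Spec_freedom_rate (line : List Int) (player : Int) (opponent : Int) (cases : List (Int × Int)) (out : Int) : Prop := out = freedom_rate_alt line player opponent cases
instance (line : List Int) (player : Int) (opponent : Int) (cases : List (Int × Int)) (out : Int) : Decidable (Spec_freedom_rate line player opponent cases out) := by unfold Spec_freedom_rate; infer_instance

-- ===== CLAIM (what is proved, stated in full; the proofs are below) =====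
def Claim_equal_freedom_rate : Prop := ∀ (line : List Int) (player : Int) (opponent : Int) (cases : List (Int × Int)), Dom_freedom_rate line player opponent cases → Spec_freedom_rate line player opponent cases (freedom_rate line player opponent cases)

-- ===== LEMMAS AND PROOFS =====

-- the two cases-loops are the same code
theorem frCases_eq (line : List Int) (cs : List (Int × Int)) :
    frCasesA line cs = frCasesB line cs := by
  induction cs with
  | nil => rfl
  | cons c rest ih => simp [frCasesA, frCasesB, ih]

-- once the open segment already holds ≥2 players, some emitted segment does
theorem segs_mono (player opponent : Int) (line : List Int) : ∀ cur : List Int,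
    2 ≤ List.count player cur →
    ∃ s ∈ frSegs opponent line cur, 2 ≤ List.count player s := by
  induction line with
  | nil => exact fun cur h => ⟨cur, by simp [frSegs], h⟩
  | cons c rest ih =>
    intro cur h
    by_cases hco : c = opponent
    · exact ⟨cur, by simp [frSegs, hco], h⟩
    · obtain ⟨s, hs, h2⟩ := ih (cur ++ [c]) (by rw [List.count_append]; omega)
      exact ⟨s, by simp [frSegs, hco, hs], h2⟩

-- every segment's player count is bounded by the open segment's plus the remaining line's
theorem segs_count_le (player opponent : Int) (line : List Int) : ∀ cur s : List Int,
    s ∈ frSegs opponent line cur →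
    List.count player s ≤ List.count player cur + List.count player line := by
  induction line with
  | nil =>
    intro cur s hs
    simp only [frSegs, List.mem_singleton] at hs
    subst hs; simp
  | cons c rest ih =>
    intro cur s hs
    have e2 : List.count player (c :: rest) = List.count player [c] + List.count player rest := by
      rw [show (c :: rest) = [c] ++ rest from rfl, List.count_append]
    by_cases hco : c = opponent
    · simp only [frSegs, if_pos hco, List.mem_cons] at hs
      rcases hs with rfl | hs
      · exact Nat.le_add_right _ _
      · have h1 := ih [] s hs
        simp only [List.count_nil, Nat.zero_add] at h1
        omega
    · simp only [frSegs, if_neg hco] at hs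
      have h1 := ih (cur ++ [c]) s hs
      rw [List.count_append] at h1
      omega

-- main characterization: with cur the open opponent-free segment already scanned,
-- A's counter reaches 2 iff some segment of B's split holds ≥2 players
theorem loop_iff_segs (player opponent : Int) (line : List Int) : ∀ (f : Nat) (cur : List Int),
    opponent ∉ cur → f = List.count player cur → f < 2 →
    (2 ≤ frLoopA player opponent line f ↔
      ∃ s ∈ frSegs opponent line cur, 2 ≤ List.count player s) := by
  induction line with
  | nil =>
    intro f cur hop hf hlt
    simp only [frLoopA, frSegs, List.mem_singleton]
    constructor
    · intro h; omega
    · rintro ⟨s, rfl, h2⟩; omega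
  | cons c rest ih =>
    intro f cur hop hf hlt
    by_cases hp : c = player
    · by_cases h2 : 2 ≤ f + 1
      · -- break: the counter reaches 2; cur already holds a player and c is another
        have hmem : player ∈ cur := List.count_pos_iff.mp (by omega)
        have hco : ¬ c = opponent := fun h => hop ((hp.symm.trans h) ▸ hmem)
        have hcnt : 2 ≤ List.count player (cur ++ [c]) := by
          rw [List.count_append]
          have : 0 < List.count player [c] := by simp [hp]
          omega
        simp only [frLoopA, if_pos hp, if_pos h2, frSegs, if_neg hco]
        exact ⟨fun _ => segs_mono player opponent rest (cur ++ [c]) hcnt, fun _ => h2⟩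
      · by_cases hco : c = opponent
        · -- reset (only reachable when player = opponent and cur holds no player)
          simp only [frLoopA, if_pos hp, if_neg h2, if_pos hco, frSegs]
          rw [ih 0 [] (by simp) (by simp) (by omega)]
          constructor
          · rintro ⟨s, hs, h⟩; exact ⟨s, List.mem_cons_of_mem _ hs, h⟩
          · rintro ⟨s, hs, h⟩
            rcases List.mem_cons.mp hs with rfl | hs'
            · omega
            · exact ⟨s, hs', h⟩
        · have hop' : opponent ∉ cur ++ [c] := by
            intro h
            rcases List.mem_append.mp h with h | h
            · exact hop h
            · simp only [List.mem_singleton] at h; exact hco h.symm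
          have hcnt : f + 1 = List.count player (cur ++ [c]) := by
            rw [List.count_append]
            have : List.count player [c] = 1 := by simp [hp]
            omega
          simp only [frLoopA, if_pos hp, if_neg h2, if_neg hco, frSegs]
          exact ih (f + 1) (cur ++ [c]) hop' hcnt (by omega)
    · by_cases hco : c = opponent
      · simp only [frLoopA, if_neg hp, if_pos hco, frSegs]
        rw [ih 0 [] (by simp) (by simp) (by omega)]
        constructor
        · rintro ⟨s, hs, h⟩; exact ⟨s, List.mem_cons_of_mem _ hs, h⟩
        · rintro ⟨s, hs, h⟩
          rcases List.mem_cons.mp hs with rfl | hs'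
          · omega
          · exact ⟨s, hs', h⟩
      · have hop' : opponent ∉ cur ++ [c] := by
          intro h
          rcases List.mem_append.mp h with h | h
          · exact hop h
          · simp only [List.mem_singleton] at h; exact hco h.symm
        have hcnt : f = List.count player (cur ++ [c]) := by
          rw [List.count_append]
          have : List.count player [c] = 0 := List.count_eq_zero.mpr (by simp only [List.mem_singleton]; exact fun h => hp h.symm)
          omega
        simp only [frLoopA, if_neg hp, if_neg hco, frSegs]
        exact ih f (cur ++ [c]) hop' hcnt hlt

-- bridge B's Bool 'any' to the existential the lemmas speak about
theorem any_iff_exists (player opponent : Int) (line : List Int) :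
    ((frSegs opponent line []).any (fun seg => 2 ≤ PySem.List.count seg player)) = true ↔
      ∃ s ∈ frSegs opponent line [], 2 ≤ List.count player s := by
  simp [List.any_eq_true, PySem.List.count_eq]

-- ===== VERDICT (by name: the statement is the Claim_ definition above) =====
theorem freedom_rate_spec : Claim_equal_freedom_rate := by
  intro line player opponent cases _
  unfold Spec_freedom_rate freedom_rate freedom_rate_alt
  have key := loop_iff_segs player opponent line 0 [] (by simp) (by simp) (by omega)
  by_cases hcnt : PySem.List.count line player < 2
  · have hline : List.count player line < 2 := by rwa [PySem.List.count_eq] at hcnt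
    have hnone : ¬ ∃ s ∈ frSegs opponent line [], 2 ≤ List.count player s := by
      rintro ⟨s, hs, h2⟩
      have := segs_count_le player opponent line [] s hs
      simp only [List.count_nil, Nat.zero_add] at this
      omega
    rw [if_pos hcnt, if_pos (fun h => hnone ((any_iff_exists player opponent line).mp h))]
  · rw [if_neg hcnt]
    by_cases hfr : frLoopA player opponent line 0 < 2
    · have hnone : ¬ ∃ s ∈ frSegs opponent line [], 2 ≤ List.count player s := by
        rw [← key]; omega
      rw [if_pos hfr, if_pos (fun h => hnone ((any_iff_exists player opponent line).mp h))]
    · have hsome := key.mp (by omega)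
      rw [if_neg hfr, if_neg (fun h => h ((any_iff_exists player opponent line).mpr hsome)), frCases_eq]
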